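-- pv_equiv track=rewrite | github.com/opurtell/StudyBot | src/python/pipeline/actas/template_parser.py | _find_template_boundaries
-- ===== SOURCE A (Python) =====
-- from typing import List, Dict, Optional, Tuple
--
-- def _find_template_boundaries(content: str, start: int) -> Tuple[int, int]:
--     depth = 0
--     in_string = False
--     escape_next = False
--     i = start
--     while i < len(content):
--         ch = content[i]
--         if escape_next:
--             escape_next = False
--             i += 1
--             continue
--         if ch == "\\" and in_string:
--             escape_next = True
--             i += 1
--             continue
--         if ch == '"':
--             in_string = not in_string
--             i += 1
--             continue
--         if in_string:
--             i += 1
--             continue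
--         if ch == "{":
--             depth += 1
--         elif ch == "}":
--             depth -= 1
--             if depth == 0:
--                 return start, i + 1
--         i += 1
--     return start, len(content)
-- ===== SOURCE B (Python) =====
-- from typing import Tuple
--
-- def _find_template_boundaries(content: str, start: int) -> Tuple[int, int]:
--     n = len(content)
--     # stage 1: tokenize — collect the brace characters that lie outside string
--     # literals, as an event list (position, char)
--     events = []
--     in_str = False
--     skip = False
--     for i in range(start, n):
--         ch = content[i]
--         if skip:
--             skip = False
--         elif in_str:
--             if ch == "\\":
--                 skip = True
--             elif ch == '"':
--                 in_str = False
--         elif ch == '"':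
--             in_str = True
--         elif ch in "{}":
--             events.append((i, ch))
--     # stage 2: fold a depth counter over the event list
--     depth = 0
--     for i, ch in events:
--         if ch == "{":
--             depth += 1
--         else:
--             depth -= 1
--             if depth == 0:
--                 return start, i + 1
--     return start, n
-- ===== Notes on version B (the rewrite author's own statement) =====
-- stated objective: alternative
-- what changed: Replaced A's single-pass while loop that interleaves string/escape state with depth tracking and early return by a staged two-pass design: a tokenizer pass that builds a list of brace events outside string literals, then a separate fold of the depth counter over that event list.
import Mathlib
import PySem

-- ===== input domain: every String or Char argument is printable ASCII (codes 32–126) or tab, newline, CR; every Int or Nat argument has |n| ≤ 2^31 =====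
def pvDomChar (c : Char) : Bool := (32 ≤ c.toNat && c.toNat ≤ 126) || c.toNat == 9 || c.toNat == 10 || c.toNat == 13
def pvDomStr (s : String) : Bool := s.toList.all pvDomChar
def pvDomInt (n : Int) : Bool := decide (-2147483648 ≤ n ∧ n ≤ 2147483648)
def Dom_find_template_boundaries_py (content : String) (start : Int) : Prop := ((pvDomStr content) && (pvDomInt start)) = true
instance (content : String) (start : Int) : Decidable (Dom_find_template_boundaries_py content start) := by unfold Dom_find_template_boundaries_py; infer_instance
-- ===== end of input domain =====

-- B replaces A's single-pass state machine (depth + string/escape flags + early return,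
-- all interleaved in one while loop) by a staged two-pass design: a tokenizer pass
-- collecting the brace events outside string literals, then a fold of the depth counter
-- over that event list (alternative decomposition, same exact result).

-- ===== PORT A =====
-- A's single while loop; i advances by exactly 1 each iteration, so fuel (len - i).toNat
-- counts the remaining iterations. pyGet? none (IndexError, i < -len) is outside Pre_.
def loopA (s : List Char) (start : Int) (i : Int) (depth : Int) (inStr esc : Bool) :
    Nat → Int × Int
  | 0 => (start, (s.length : Int))
  | n + 1 =>
    if i < (s.length : Int) then
      match PySem.List.pyGet? s i with
      | none => (start, (s.length : Int))   -- IndexError in Python (excluded by Pre_)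
      | some ch =>
        if esc then loopA s start (i + 1) depth inStr false n
        else if ch == '\\' && inStr then loopA s start (i + 1) depth inStr true n
        else if ch == '"' then loopA s start (i + 1) depth (!inStr) esc n
        else if inStr then loopA s start (i + 1) depth inStr esc n
        else if ch == '{' then loopA s start (i + 1) (depth + 1) inStr esc n
        else if ch == '}' then
          if depth - 1 == 0 then (start, i + 1)
          else loopA s start (i + 1) (depth - 1) inStr esc n
        else loopA s start (i + 1) depth inStr esc n
    else (start, (s.length : Int))

def find_template_boundaries_py (content : String) (start : Int) : Int × Int :=
  loopA content.toList start start 0 false false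
    (((content.toList.length : Int) - start).toNat)

-- ===== PORT B =====
-- Stage 1 of Source B: the for-loop over range(start, n) that collects brace events
-- (position, char) outside string literals; structural recursion over the range list.
def pass1 (s : List Char) : List Int → Bool → Bool → List (Int × Char)
  | [], _, _ => []
  | i :: rest, inStr, skip =>
    match PySem.List.pyGet? s i with
    | none => []                            -- IndexError in Python (excluded by Pre_)
    | some ch =>
      if skip then pass1 s rest inStr false
      else if inStr then
        if ch == '\\' then pass1 s rest inStr true
        else if ch == '"' then pass1 s rest false skip
        else pass1 s rest inStr skip
      else if ch == '"' then pass1 s rest true skip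
      else if ch == '{' || ch == '}' then   -- ch in "{}"
        (i, ch) :: pass1 s rest inStr skip
      else pass1 s rest inStr skip

-- Stage 2 of Source B: fold the depth counter over the event list.
def pass2 (start n : Int) : List (Int × Char) → Int → Int × Int
  | [], _ => (start, n)
  | (i, ch) :: rest, depth =>
    if ch == '{' then pass2 start n rest (depth + 1)
    else if depth - 1 == 0 then (start, i + 1)
    else pass2 start n rest (depth - 1)

def find_template_boundaries_py_alt (content : String) (start : Int) : Int × Int :=
  pass2 start (content.toList.length : Int)
    (pass1 content.toList
      (PySem.List.pyRange start (content.toList.length : Int) 1) false false) 0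

-- ===== PRECONDITION & SPEC =====
-- Pre_ excludes exactly the inputs on which Python A raises IndexError:
-- start < -len(content) (the very first content[i] is out of range even for
-- Python's negative indexing). B raises the same IndexError there.
def Pre_find_template_boundaries_py (content : String) (start : Int) : Prop :=
  -(content.toList.length : Int) ≤ start
instance (content : String) (start : Int) :
    Decidable (Pre_find_template_boundaries_py content start) := by
  unfold Pre_find_template_boundaries_py; infer_instance

def pvWitness_find_template_boundaries_py : String × Int := ("{\"a}\\\"\": 1}", 0)

def Spec_find_template_boundaries_py (content : String) (start : Int) (out : Int × Int) : Prop := out = find_template_boundaries_py_alt content start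
instance (content : String) (start : Int) (out : Int × Int) : Decidable (Spec_find_template_boundaries_py content start out) := by unfold Spec_find_template_boundaries_py; infer_instance

-- ===== CLAIM (what is proved, stated in full; the proofs are below) =====
def Claim_equal_find_template_boundaries_py : Prop := ∀ (content : String) (start : Int), Dom_find_template_boundaries_py content start → Pre_find_template_boundaries_py content start → Spec_find_template_boundaries_py content start (find_template_boundaries_py content start)

-- ===== LEMMAS AND PROOFS =====

-- canonical-fuel wrapper for A's loop
def fuelF (s : List Char) (i : Int) : Nat := (((s.length : Int)) - i).toNat
def runA (s : List Char) (start i depth : Int) (inStr esc : Bool) : Int × Int :=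
  loopA s start i depth inStr esc (fuelF s i)

-- one-step unfolding of the canonical-fuel wrapper
lemma runA_step (s : List Char) (start i depth : Int) (inStr esc : Bool) :
    runA s start i depth inStr esc =
      if i < (s.length : Int) then
        match PySem.List.pyGet? s i with
        | none => (start, (s.length : Int))
        | some ch =>
          if esc then runA s start (i + 1) depth inStr false
          else if ch == '\\' && inStr then runA s start (i + 1) depth inStr true
          else if ch == '"' then runA s start (i + 1) depth (!inStr) esc
          else if inStr then runA s start (i + 1) depth inStr esc
          else if ch == '{' then runA s start (i + 1) (depth + 1) inStr esc
          else if ch == '}' then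
            if depth - 1 == 0 then (start, i + 1)
            else runA s start (i + 1) (depth - 1) inStr esc
          else runA s start (i + 1) depth inStr esc
      else (start, (s.length : Int)) := by
  by_cases hi : i < (s.length : Int)
  · have hf : fuelF s i = fuelF s (i + 1) + 1 := by unfold fuelF; omega
    unfold runA
    rw [hf]
    simp only [loopA, if_pos hi]
  · have h0 : fuelF s i = 0 := by unfold fuelF; omega
    unfold runA; rw [h0]
    simp [loopA, hi]

-- main invariant: from any loop state of A, A's remaining run equals the fold of the
-- depth counter over the events the tokenizer collects on the remaining range.
lemma mainAB (s : List Char) (start : Int) : ∀ (k : Nat) (i depth : Int) (inStr esc : Bool),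
    fuelF s i = k →
    runA s start i depth inStr esc =
      pass2 start (s.length : Int)
        (pass1 s (PySem.List.pyRange i (s.length : Int) 1) inStr esc) depth := by
  intro k
  induction k using Nat.strong_induction_on with
  | _ k ih =>
    intro i depth inStr esc hk
    by_cases hi : i < (s.length : Int)
    · have hdec : fuelF s (i + 1) < k := by unfold fuelF at *; omega
      rw [runA_step, if_pos hi, PySem.List.pyRange_one_cons hi]
      simp only [pass1]
      match hg : PySem.List.pyGet? s i with
      | none => simp [pass2]
      | some c =>
        simp only
        cases esc with
        | true =>
          simp only [if_true]
          exact ih _ hdec (i + 1) depth inStr false rfl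
        | false =>
          simp only [Bool.false_eq_true, if_false]
          cases inStr with
          | true =>
            simp only [Bool.and_true, if_true]
            by_cases hbs : c = '\\'
            · subst hbs
              simp
              exact ih _ hdec (i + 1) depth true true rfl
            · by_cases hq : c = '"'
              · subst hq
                simp
                exact ih _ hdec (i + 1) depth false false rfl
              · simp [hbs, hq]
                exact ih _ hdec (i + 1) depth true false rfl
          | false =>
            simp only [Bool.and_false, Bool.false_eq_true, if_false]
            by_cases hq : c = '"'
            · subst hq
              simp
              exact ih _ hdec (i + 1) depth true false rfl
            · by_cases hob : c = '{'
              · subst hob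
                simp [pass2]
                exact ih _ hdec (i + 1) (depth + 1) false false rfl
              · by_cases hcb : c = '}'
                · subst hcb
                  simp [pass2]
                  split
                  · rfl
                  · exact ih _ hdec (i + 1) (depth - 1) false false rfl
                · simp [hq, hob, hcb]
                  exact ih _ hdec (i + 1) depth false false rfl
    · rw [runA_step, if_neg hi,
        PySem.List.pyRange_one_eq_nil (by omega)]
      simp [pass1, pass2]

-- ===== VERDICT (by name: the statement is the Claim_ definition above) =====
theorem find_template_boundaries_py_spec : Claim_equal_find_template_boundaries_py := by
  intro content start _ _
  unfold Spec_find_template_boundaries_py find_template_boundaries_py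
    find_template_boundaries_py_alt
  exact mainAB content.toList start (fuelF content.toList start) start 0 false false rfl
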